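-- pv_equiv track=rewrite | github.com/LiliaSkumatova/CPSC-231-Assignments-homework | Assignment 4/classes.py | get_far_right
-- ===== SOURCE A (Python) =====
-- def get_far_right(guard_col, guard_attack):
--     within_range = False
--     while not within_range:
--         # checks if it does not go beyond the grid size of 16
--         if (guard_col + guard_attack) <= 16:
--             what_is_being_returned = guard_col + guard_attack
--             return what_is_being_returned
--         guard_col = guard_col - 1
--     return guard_col
-- ===== SOURCE B (Python) =====
-- def get_far_right(guard_col, guard_attack):
--     return min(guard_col + guard_attack, 16)
-- ===== Notes on version B (the rewrite author's own statement) =====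
-- stated objective: faster
-- what changed: Replaced the decrement-until-in-range while loop with the closed form min(guard_col + guard_attack, 16), which is the loop's exact fixed point on integer inputs.
import Mathlib
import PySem

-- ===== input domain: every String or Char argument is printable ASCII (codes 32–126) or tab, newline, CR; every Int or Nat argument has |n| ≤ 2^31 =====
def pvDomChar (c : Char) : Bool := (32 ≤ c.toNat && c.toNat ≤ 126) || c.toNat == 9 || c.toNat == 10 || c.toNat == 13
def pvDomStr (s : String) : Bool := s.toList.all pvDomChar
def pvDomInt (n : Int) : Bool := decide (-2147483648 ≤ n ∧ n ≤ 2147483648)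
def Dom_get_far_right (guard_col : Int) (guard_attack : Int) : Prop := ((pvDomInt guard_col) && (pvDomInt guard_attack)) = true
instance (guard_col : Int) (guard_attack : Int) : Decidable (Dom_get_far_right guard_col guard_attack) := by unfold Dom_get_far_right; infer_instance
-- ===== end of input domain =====

-- B replaces A's decrement-until-in-range loop with the closed form min(guard_col + guard_attack, 16) (O(1) instead of a linear loop).

-- ===== PORT A =====
-- A's while loop: decrement guard_col until guard_col + guard_attack ≤ 16, then return the sum.
def get_far_right (guard_col : Int) (guard_attack : Int) : Int :=
  if guard_col + guard_attack ≤ 16 then guard_col + guard_attack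
  else get_far_right (guard_col - 1) guard_attack
termination_by (guard_col + guard_attack - 16).toNat
decreasing_by omega

-- ===== PORT B =====
def get_far_right_alt (guard_col : Int) (guard_attack : Int) : Int :=
  min (guard_col + guard_attack) 16

-- ===== PRECONDITION & SPEC =====
def Spec_get_far_right (guard_col : Int) (guard_attack : Int) (out : Int) : Prop := out = get_far_right_alt guard_col guard_attack
instance (guard_col : Int) (guard_attack : Int) (out : Int) : Decidable (Spec_get_far_right guard_col guard_attack out) := by unfold Spec_get_far_right; infer_instance

-- ===== CLAIM (what is proved, stated in full; the proofs are below) =====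
def Claim_equal_get_far_right : Prop := ∀ (guard_col : Int) (guard_attack : Int), Dom_get_far_right guard_col guard_attack → Spec_get_far_right guard_col guard_attack (get_far_right guard_col guard_attack)

-- ===== LEMMAS AND PROOFS =====
theorem get_far_right_eq_min (guard_col guard_attack : Int) :
    get_far_right guard_col guard_attack = min (guard_col + guard_attack) 16 := by
  by_cases h : guard_col + guard_attack ≤ 16
  · rw [get_far_right]
    simp [h]
  · rw [get_far_right]
    simp only [h, if_false]
    have ih := get_far_right_eq_min (guard_col - 1) guard_attack
    rw [ih]
    omega
termination_by (guard_col + guard_attack - 16).toNat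
decreasing_by omega

-- ===== VERDICT (by name: the statement is the Claim_ definition above) =====
theorem get_far_right_spec : Claim_equal_get_far_right := by
  intro g a _
  unfold Spec_get_far_right get_far_right_alt
  exact get_far_right_eq_min g a
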